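-- pv_equiv track=rewrite | github.com/CarlosYiip/Primary-Stress-Prediction | submission.py | n_syllable_after_ith_vowel_syllable
-- ===== SOURCE A (Python) =====
-- def is_vowel(v):
--     return '0' in v or '1' in v or '2' in v
--
-- def n_syllable_after_ith_vowel_syllable(p, c, i, n):
--     l = p.split(' ')
--     count = 0
--     for j in range(len(l)):
--         if is_vowel(l[j]):
--             count += 1
--             if count == i:
--                 if j >= len(l) - n:
--                     return False
--                 else:
--                     ans = l[j+n]
--                     if is_vowel(ans):
--                         return ans[:-1] == c
--                     else:
--                         return ans == c
--
--     return False
-- ===== SOURCE B (Python) =====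
-- def is_vowel(v):
--     return '0' in v or '1' in v or '2' in v
--
-- def n_syllable_after_ith_vowel_syllable(p, c, i, n):
--     # single character-level pass over p: count words, flag the current word once
--     # it shows a digit, and record the word index of the i-th digit-bearing word
--     words = 1
--     count = 0
--     seen = False
--     j = None
--     for ch in p:
--         if ch == ' ':
--             words += 1
--             seen = False
--         elif ch in '012' and not seen:
--             seen = True
--             count += 1
--             if count == i:
--                 j = words - 1
--     if j is None or j >= words - n:
--         return False
--     ans = p.split(' ')[j + n]
--     return ans[:-1] == c if is_vowel(ans) else ans == c
-- ===== Notes on version B (the rewrite author's own statement) =====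
-- stated objective: alternative
-- what changed: Instead of splitting the string and looping over the word list with a vowel counter, B makes a single character-level pass over the raw string (tracking the word counter, a per-word 'already counted' flag and the i-th hit's word index), and only then splits once for the final lookup.
import Mathlib
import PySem

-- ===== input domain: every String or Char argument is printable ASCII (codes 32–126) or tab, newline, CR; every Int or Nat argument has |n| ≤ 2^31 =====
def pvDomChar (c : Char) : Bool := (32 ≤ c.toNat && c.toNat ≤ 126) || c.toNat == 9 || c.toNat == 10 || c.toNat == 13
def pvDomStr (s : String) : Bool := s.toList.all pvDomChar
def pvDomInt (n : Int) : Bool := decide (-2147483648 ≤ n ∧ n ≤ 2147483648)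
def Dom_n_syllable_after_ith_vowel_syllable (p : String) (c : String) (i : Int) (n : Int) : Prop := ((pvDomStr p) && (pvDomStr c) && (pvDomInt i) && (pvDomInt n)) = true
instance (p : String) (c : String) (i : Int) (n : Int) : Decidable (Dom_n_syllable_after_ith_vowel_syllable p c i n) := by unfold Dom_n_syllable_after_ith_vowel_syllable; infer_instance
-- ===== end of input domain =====

-- B replaces A's loop over the split word list by a single character-level scan of the raw
-- string that locates the i-th digit-bearing word directly (alternative traversal, same cost).

-- shared helper: Python's is_vowel(v) = '0' in v or '1' in v or '2' in v
def pvVowel (v : String) : Bool :=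
  PySem.Str.isIn "0" v || PySem.Str.isIn "1" v || PySem.Str.isIn "2" v

-- shared helper: Python's p.split(' ')  (sep " " ≠ "", so split? is always some)
def pvWords (p : String) : List String :=
  (PySem.Str.split? p " ").getD []

-- ===== PORT A =====
-- A's `for j in range(len(l))` loop with the running vowel counter `count`.
-- Where Python raises IndexError (l[j+n] with j+n < -len(l)) pyGet? is none and the port returns false: excluded by Pre_.
def pvALoop (l : List String) (c : String) (i n : Int) (j : Nat) (count : Int) : Bool :=
  if h : j < l.length then
    if pvVowel l[j] then
      if count + 1 = i then
        if (l.length : Int) - n ≤ (j : Int) then false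
        else
          match PySem.List.pyGet? l ((j : Int) + n) with
          | some ans => if pvVowel ans then PySem.Str.slice ans none (some (-1)) == c else ans == c
          | none => false
      else pvALoop l c i n (j + 1) (count + 1)
    else pvALoop l c i n (j + 1) count
  else false
termination_by l.length - j

def n_syllable_after_ith_vowel_syllable (p : String) (c : String) (i : Int) (n : Int) : Bool :=
  pvALoop (pvWords p) c i n 0 0

-- ===== PORT B =====
-- B's `for ch in p` body, state (words, count, seen, j): spaces bump the word counter and
-- reset `seen`; the first digit of a word bumps `count` and, when count == i, records j.
def pvScanStep (i : Int) (st : Int × Int × Bool × Option Int) (ch : Char) : Int × Int × Bool × Option Int :=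
  if ch == ' ' then (st.1 + 1, st.2.1, false, st.2.2.2)
  else if (ch == '0' || ch == '1' || ch == '2') && !st.2.2.1 then
    (st.1, st.2.1 + 1, true, if st.2.1 + 1 == i then some (st.1 - 1) else st.2.2.2)
  else st

def n_syllable_after_ith_vowel_syllable_alt (p : String) (c : String) (i : Int) (n : Int) : Bool :=
  let r := p.toList.foldl (pvScanStep i) (1, 0, false, none)
  match r.2.2.2 with
  | none => false
  | some j =>
    if r.1 - n ≤ j then false
    else
      match PySem.List.pyGet? (pvWords p) (j + n) with
      | some ans => if pvVowel ans then PySem.Str.slice ans none (some (-1)) == c else ans == c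
      | none => false  -- Python raises IndexError here; excluded by Pre_

-- ===== PRECONDITION & SPEC =====
-- Pre_ excludes exactly the inputs on which the Python A raises IndexError: the i-th vowel word
-- exists at position j, the guard j >= len(l)-n does not fire, and yet j+n < -len(l) (very negative n),
-- so l[j+n] is out of range even for Python's negative indexing.  (B raises there too.)
def Pre_n_syllable_after_ith_vowel_syllable (p : String) (c : String) (i : Int) (n : Int) : Prop :=
  let l := pvWords p
  let idx := ((PySem.List.enumerate l 0).filter (fun q => pvVowel q.2)).map (·.1)
  i ≤ 0 ∨ (idx.length : Int) < i ∨
    ∀ j ∈ (PySem.List.pyGet? idx (i - 1)), ((l.length : Int) - n ≤ j ∨ -(l.length : Int) ≤ j + n)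
instance (p : String) (c : String) (i : Int) (n : Int) : Decidable (Pre_n_syllable_after_ith_vowel_syllable p c i n) := by
  unfold Pre_n_syllable_after_ith_vowel_syllable; infer_instance

def pvWitness_n_syllable_after_ith_vowel_syllable : String × String × Int × Int := ("a1 b c0", "c", 2, 1)

def Spec_n_syllable_after_ith_vowel_syllable (p : String) (c : String) (i : Int) (n : Int) (out : Bool) : Prop := out = n_syllable_after_ith_vowel_syllable_alt p c i n
instance (p : String) (c : String) (i : Int) (n : Int) (out : Bool) : Decidable (Spec_n_syllable_after_ith_vowel_syllable p c i n out) := by unfold Spec_n_syllable_after_ith_vowel_syllable; infer_instance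

-- ===== CLAIM (what is proved, stated in full; the proofs are below) =====
def Claim_equal_n_syllable_after_ith_vowel_syllable : Prop := ∀ (p : String) (c : String) (i : Int) (n : Int), Dom_n_syllable_after_ith_vowel_syllable p c i n → Pre_n_syllable_after_ith_vowel_syllable p c i n → Spec_n_syllable_after_ith_vowel_syllable p c i n (n_syllable_after_ith_vowel_syllable p c i n)

-- ===== LEMMAS AND PROOFS =====

-- structural model of Python's s.split(' ') on the character list
def mySplit : List Char → List (List Char)
  | [] => [[]]
  | ch :: cs => if ch = ' ' then [] :: mySplit cs
               else ((ch :: (mySplit cs).headI) :: (mySplit cs).tail)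

theorem mySplit_ne_nil (cs : List Char) : mySplit cs ≠ [] := by
  cases cs with
  | nil => simp [mySplit]
  | cons c cs => unfold mySplit; split <;> simp

theorem go_eq (fuel : Nat) (l cur : List Char) (acc : List (List Char)) (h : l.length < fuel) :
    PySem.Chars.splitOn.go [' '] fuel l cur acc
      = acc.reverse ++ (cur.reverse ++ (mySplit l).headI) :: (mySplit l).tail := by
  induction fuel generalizing l cur acc with
  | zero => omega
  | succ f ih =>
    cases l with
    | nil => simp [PySem.Chars.splitOn.go, mySplit]
    | cons ch rest =>
      rw [PySem.Chars.splitOn.go]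
      simp only [List.length_cons] at h
      by_cases hc : ch = ' '
      · subst hc
        rw [if_pos (by simp [List.isPrefixOf])]
        rw [ih _ _ _ (by simpa using h)]
        obtain ⟨w, ws, hw⟩ := List.exists_cons_of_ne_nil (mySplit_ne_nil rest)
        simp [mySplit, hw, List.reverse_cons, List.append_assoc]
      · rw [if_neg (by simp [List.isPrefixOf, Ne.symm hc])]
        rw [ih _ _ _ (by omega)]
        obtain ⟨w, ws, hw⟩ := List.exists_cons_of_ne_nil (mySplit_ne_nil rest)
        simp [mySplit, hc, hw, List.reverse_cons, List.append_assoc]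

theorem pvWords_eq (p : String) : pvWords p = (mySplit p.toList).map String.ofList := by
  unfold pvWords
  rw [PySem.Str.split?]
  have hsep : (" " : String).toList = [' '] := rfl
  simp only [PySem.Chars.split?, hsep, List.isEmpty_cons, if_false, Option.map_some,
    Option.getD_some]
  rw [PySem.Chars.splitOn, go_eq _ _ _ _ (by omega)]
  obtain ⟨w, ws, hw⟩ := List.exists_cons_of_ne_nil (mySplit_ne_nil p.toList)
  simp [hw]

-- a word contains a digit 0/1/2
def hasDigit (w : List Char) : Bool := w.any (fun ch => ch == '0' || ch == '1' || ch == '2')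

theorem any_or_split (w : List Char) (f g : Char → Bool) :
    w.any (fun ch => f ch || g ch) = (w.any f || w.any g) := by
  induction w with
  | nil => rfl
  | cons a t ih =>
    simp only [List.any_cons, ih]
    cases f a <;> cases g a <;> simp

theorem isIn_singleton (d : Char) (w : List Char) :
    PySem.Chars.isIn [d] w = w.any (fun ch => ch == d) := by
  by_cases h : d ∈ w
  · rw [List.any_eq_true.2 ⟨d, h, by simp⟩, (PySem.Chars.isIn_iff_infix [d] w).2]
    exact List.infix_iff_prefix_suffix.2 (by
      obtain ⟨s, t, hst⟩ := List.append_of_mem h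
      exact ⟨[d] ++ t, ⟨t, rfl⟩, ⟨s, by simp [hst]⟩⟩)
  · rw [(PySem.Chars.isIn_eq_false_iff [d] w).2 (fun hinf => h (hinf.mem (by simp)))]
    symm
    simp only [List.any_eq_false]
    intro x hx
    simp only [beq_iff_eq]
    intro he; exact h (he ▸ hx)

theorem vowel_ofList (w : List Char) : pvVowel (String.ofList w) = hasDigit w := by
  unfold pvVowel hasDigit
  rw [PySem.Str.isIn, PySem.Str.isIn, PySem.Str.isIn]
  have h0 : ("0" : String).toList = ['0'] := rfl
  have h1 : ("1" : String).toList = ['1'] := rfl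
  have h2 : ("2" : String).toList = ['2'] := rfl
  simp only [String.toList_ofList, h0, h1, h2]
  rw [isIn_singleton, isIn_singleton, isIn_singleton, any_or_split, any_or_split]

-- position of the k-th vowel word of l, scanning from index j (none if there is no such word)
def nthVFrom (l : List String) (j : Nat) (k : Int) : Option Int :=
  if h : j < l.length then
    if pvVowel l[j] then
      if k = 1 then some (j : Int) else nthVFrom l (j + 1) (k - 1)
    else nthVFrom l (j + 1) k
  else none
termination_by l.length - j

-- the same on char-lists, structurally
def nthW : List (List Char) → Int → Int → Option Int
  | [], _, _ => none
  | w :: t, k, pos =>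
    if hasDigit w then (if k = 1 then some pos else nthW t (k - 1) (pos + 1))
    else nthW t k (pos + 1)

theorem nthW_cons (w : List Char) (t : List (List Char)) (k pos : Int) :
    nthW (w :: t) k pos
      = if hasDigit w then (if k = 1 then some pos else nthW t (k - 1) (pos + 1))
        else nthW t k (pos + 1) := rfl

theorem hasDigit_nil : hasDigit [] = false := rfl

-- the final check both programs perform once the target word position j is known
def pvCheck (l : List String) (c : String) (n : Int) (j : Int) : Bool :=
  if (l.length : Int) - n ≤ j then false
  else
    match PySem.List.pyGet? l (j + n) with
    | some ans => if pvVowel ans then PySem.Str.slice ans none (some (-1)) == c else ans == c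
    | none => false

theorem pvALoop_eq (l : List String) (c : String) (i n : Int) (j : Nat) (k : Int) :
    ∀ count : Int, k = i - count →
      pvALoop l c i n j count =
        (match nthVFrom l j k with
         | none => false
         | some jj => pvCheck l c n jj) := by
  induction j, k using nthVFrom.induct l with
  | case1 j h hv =>
    intro count hk
    rw [pvALoop, dif_pos h, if_pos hv, if_pos (by omega), nthVFrom, dif_pos h, if_pos hv,
      if_pos rfl]
    rfl
  | case2 j k h hv hk1 ih =>
    intro count hk
    rw [pvALoop, dif_pos h, if_pos hv, if_neg (by omega), nthVFrom, dif_pos h, if_pos hv,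
      if_neg hk1, ih (count + 1) (by omega)]
  | case3 j k h hv ih =>
    intro count hk
    rw [pvALoop, dif_pos h, if_neg hv, nthVFrom, dif_pos h, if_neg hv, ih count hk]
  | case4 j k h =>
    intro count hk
    rw [pvALoop, dif_neg h, nthVFrom, dif_neg h]

theorem nthVFrom_map (ws : List (List Char)) (j : Nat) (k : Int) :
    nthVFrom (ws.map String.ofList) j k = nthW (ws.drop j) k (j : Int) := by
  induction j, k using nthVFrom.induct (ws.map String.ofList) with
  | case1 j h hv =>
    have hj : j < ws.length := by simpa using h
    rw [nthVFrom, dif_pos h, if_pos hv, if_pos rfl,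
      List.drop_eq_getElem_cons hj, nthW,
      if_pos (by rw [← vowel_ofList]; simpa using hv), if_pos rfl]
  | case2 j k h hv hk1 ih =>
    have hj : j < ws.length := by simpa using h
    rw [nthVFrom, dif_pos h, if_pos hv, if_neg hk1, ih,
      List.drop_eq_getElem_cons hj, nthW,
      if_pos (by rw [← vowel_ofList]; simpa using hv), if_neg hk1]
    push_cast
    ring_nf
  | case3 j k h hv ih =>
    have hj : j < ws.length := by simpa using h
    rw [nthVFrom, dif_pos h, if_neg hv, ih,
      List.drop_eq_getElem_cons hj, nthW,
      if_neg (by rw [← vowel_ofList]; simpa using hv)]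
    push_cast
    ring_nf
  | case4 j k h =>
    rw [nthVFrom, dif_neg h,
      List.drop_eq_nil_of_le (by simpa using Nat.le_of_not_lt h)]
    rfl

theorem nthW_of_nonpos (ws : List (List Char)) (k pos : Int) (hk : k ≤ 0) :
    nthW ws k pos = none := by
  induction ws generalizing k pos with
  | nil => rfl
  | cons w t ih =>
    unfold nthW
    split
    · rw [if_neg (by omega), ih _ _ (by omega)]
    · exact ih _ _ hk

-- first word of ws, emptied when the scan has already flagged the current word
def maskFst (seen : Bool) (ws : List (List Char)) : List (List Char) :=
  if seen then [] :: ws.tail else ws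

theorem scan_spec (i : Int) (cs : List Char) :
    ∀ (seen : Bool) (words count : Int) (j : Option Int),
      (cs.foldl (pvScanStep i) (words, count, seen, j)).1
          = words + ((mySplit cs).length : Int) - 1 ∧
      (cs.foldl (pvScanStep i) (words, count, seen, j)).2.2.2
          = (nthW (maskFst seen (mySplit cs)) (i - count) (words - 1)).or j := by
  induction cs with
  | nil =>
    intro seen words count j
    refine ⟨by simp [mySplit], ?_⟩
    have : nthW (maskFst seen (mySplit [])) (i - count) (words - 1) = none := by
      cases seen <;> simp [maskFst, mySplit, nthW, hasDigit]
    simp [this]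
  | cons ch cs ih =>
    intro seen words count j
    obtain ⟨w0, ws0, hw⟩ := List.exists_cons_of_ne_nil (mySplit_ne_nil cs)
    by_cases hsp : ch = ' '
    · subst hsp
      have hstep : pvScanStep i (words, count, seen, j) ' ' = (words + 1, count, false, j) := by
        simp [pvScanStep]
      have hms : mySplit (' ' :: cs) = [] :: mySplit cs := by simp [mySplit]
      have hmask : maskFst seen ([] :: mySplit cs) = [] :: mySplit cs := by
        cases seen <;> simp [maskFst]
      refine ⟨?_, ?_⟩
      · rw [List.foldl_cons, hstep, (ih false (words + 1) count j).1, hms]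
        simp; ring
      · rw [List.foldl_cons, hstep, (ih false (words + 1) count j).2, hms, hmask, nthW,
          if_neg (by simp [hasDigit]), maskFst]
        simp
    · have hms : mySplit (ch :: cs) = (ch :: w0) :: ws0 := by
        rw [mySplit, if_neg hsp, hw]; rfl
      have hchsp : (ch == ' ') = false := by simp [hsp]
      have hmaskF : ∀ ws : List (List Char), maskFst false ws = ws := fun _ => rfl
      have hmaskT : ∀ ws : List (List Char), maskFst true ws = [] :: ws.tail := fun _ => rfl
      by_cases hseen : seen
      · subst hseen
        have hstep : pvScanStep i (words, count, true, j) ch = (words, count, true, j) := by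
          simp [pvScanStep, hchsp]
        refine ⟨?_, ?_⟩
        · rw [List.foldl_cons, hstep, (ih true words count j).1, hms, hw]
          simp
        · rw [List.foldl_cons, hstep, (ih true words count j).2, hmaskT, hmaskT, hms, hw]
          rfl
      · simp only [Bool.not_eq_true] at hseen
        subst hseen
        by_cases hd : (ch == '0' || ch == '1' || ch == '2') = true
        · have hstep : pvScanStep i (words, count, false, j) ch
              = (words, count + 1, true, if count + 1 == i then some (words - 1) else j) := by
            simp [pvScanStep, hchsp, hd]
          have hhd : hasDigit (ch :: w0) = true := by simp [hasDigit, List.any_cons, hd]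
          refine ⟨?_, ?_⟩
          · rw [List.foldl_cons, hstep, (ih true words (count + 1) _).1, hms, hw]
            simp
          · rw [List.foldl_cons, hstep, (ih true words (count + 1) _).2, hmaskT, hw, hmaskF,
              hms, List.tail_cons, nthW_cons, nthW_cons, hhd]
            simp only [hasDigit_nil, Bool.false_eq_true, if_false, if_true]
            by_cases hki : i - count = 1
            · rw [if_pos hki, nthW_of_nonpos _ _ _ (by omega)]
              simp only [Option.none_or]
              rw [if_pos (by simpa using (by omega : count + 1 = i)), Option.some_or]
            · rw [if_neg hki]
              have hne : (count + 1 == i) = false := by rw [beq_eq_false_iff_ne]; omega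
              rw [hne]
              simp only [Bool.false_eq_true, if_false]
              congr 2 <;> omega
        · have hd' : (ch == '0' || ch == '1' || ch == '2') = false := by simpa using hd
          have hstep : pvScanStep i (words, count, false, j) ch = (words, count, false, j) := by
            simp [pvScanStep, hchsp, hd']
          have hhd : hasDigit (ch :: w0) = hasDigit w0 := by
            simp [hasDigit, List.any_cons, hd']
          refine ⟨?_, ?_⟩
          · rw [List.foldl_cons, hstep, (ih false words count j).1, hms, hw]
            simp
          · rw [List.foldl_cons, hstep, (ih false words count j).2, hmaskF, hmaskF, hms, hw]
            simp only [nthW, hhd]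

-- ===== VERDICT (by name: the statement is the Claim_ definition above) =====
theorem n_syllable_after_ith_vowel_syllable_spec : Claim_equal_n_syllable_after_ith_vowel_syllable := by
  intro p c i n _ _
  unfold Spec_n_syllable_after_ith_vowel_syllable n_syllable_after_ith_vowel_syllable
    n_syllable_after_ith_vowel_syllable_alt
  rw [pvALoop_eq (pvWords p) c i n 0 i 0 (by omega)]
  obtain ⟨h1, h2⟩ := scan_spec i p.toList false 1 0 none
  have hlen : ((pvWords p).length : Int) = (p.toList.foldl (pvScanStep i) (1, 0, false, none)).1 := by
    rw [h1, pvWords_eq]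
    simp
  have hnth : nthVFrom (pvWords p) 0 i
      = (p.toList.foldl (pvScanStep i) (1, 0, false, none)).2.2.2 := by
    rw [h2, pvWords_eq, nthVFrom_map]
    simp [maskFst]
  rw [hnth]
  rcases hr : (p.toList.foldl (pvScanStep i) (1, 0, false, none)).2.2.2 with _ | j
  · simp only [hr]
  · simp only [hr, pvCheck, hlen]
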